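-- pv_equiv track=rewrite | github.com/anhphan2705/library_management | library_management.py | read_library_log
-- ===== SOURCE A (Python) =====
-- def read_library_log(log):
--     """
--     Go through the library log to sort each command into a appropriate place
--     - Borrow book:      B#<day>#<Student Name>#<Book name>#<days borrowed for>
--     - Return book:      R#<day>#<Student Name>#<Book name>
--     - Addition book:    A#<day>#<Book name>
--     - Fine pay:         P#<day>#<student name>#<amount>
--
--     Param:
--     - log: the library log
--
--     Return:
--     - borrow_log = a list of command lines regarding information of book being borrowed
--     - return_log = a list of command lines regarding information of book being returned
--     - addition_log = a list of command lines regarding information of book being added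
--     - fine_log = a list of comand lines regarding information of people being fined
--     - day_available = an int that represent the amount of days the log is available
--     """
--     borrow_log = []
--     return_log = []
--     addition_log = []
--     fine_log = []
--     day_available = 0
--
--     for line in log:
--         function_type = line[:line.find("#")]
--         if function_type == "B":
--             borrow_log.append(line)
--         elif function_type == "R":
--             return_log.append(line)
--         elif function_type == "A":
--             addition_log.append(line)
--         elif function_type == "P":
--             fine_log.append(line)
--         elif line.isdigit():
--             day_available = int(line)
--
--     return borrow_log, return_log, addition_log, fine_log, day_available
-- ===== SOURCE B (Python) =====
-- def read_library_log(log):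
--     log = list(log)
--     cat = lambda line: line[:line.find("#")]
--     borrow_log = [line for line in log if cat(line) == "B"]
--     return_log = [line for line in log if cat(line) == "R"]
--     addition_log = [line for line in log if cat(line) == "A"]
--     fine_log = [line for line in log if cat(line) == "P"]
--     digit_lines = [line for line in log if line.isdigit()]
--     day_available = int(digit_lines[-1]) if digit_lines else 0
--     return borrow_log, return_log, addition_log, fine_log, day_available
-- ===== Notes on version B (the rewrite author's own statement) =====
-- stated objective: idiomatic
-- what changed: Replaces the single five-way dispatch loop with one filtering comprehension per category plus a separate pass collecting digit lines whose last element gives day_available.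
import Mathlib
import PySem

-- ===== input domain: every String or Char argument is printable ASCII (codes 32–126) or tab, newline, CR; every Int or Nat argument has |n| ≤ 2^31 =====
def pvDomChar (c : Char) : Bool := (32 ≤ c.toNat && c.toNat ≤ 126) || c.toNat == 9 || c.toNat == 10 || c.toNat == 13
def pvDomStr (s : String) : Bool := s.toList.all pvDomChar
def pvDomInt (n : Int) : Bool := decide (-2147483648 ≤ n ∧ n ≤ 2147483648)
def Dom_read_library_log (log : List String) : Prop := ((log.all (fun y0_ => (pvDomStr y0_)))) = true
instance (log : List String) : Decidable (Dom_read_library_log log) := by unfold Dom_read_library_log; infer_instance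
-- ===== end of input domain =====

-- B replaces A's single dispatch loop with one filtering pass per category plus a
-- separate pass for the last all-digit line (idiomatic decomposition; same cost).

-- line[:line.find("#")], the prefix before the first '#' (used by both Pythons)
def pvCat (line : String) : String :=
  PySem.Str.slice line none (some (PySem.Str.find line "#"))

-- ===== PORT A =====
-- one loop step of A's for-loop over the five accumulators
def pvStepA (st : List String × List String × List String × List String × Int)
    (line : String) : List String × List String × List String × List String × Int :=
  let ft := pvCat line
  if ft == "B" then (st.1 ++ [line], st.2.1, st.2.2.1, st.2.2.2.1, st.2.2.2.2)
  else if ft == "R" then (st.1, st.2.1 ++ [line], st.2.2.1, st.2.2.2.1, st.2.2.2.2)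
  else if ft == "A" then (st.1, st.2.1, st.2.2.1 ++ [line], st.2.2.2.1, st.2.2.2.2)
  else if ft == "P" then (st.1, st.2.1, st.2.2.1, st.2.2.2.1 ++ [line], st.2.2.2.2)
  else if PySem.Str.strIsdigit line then
    -- int(line): never raises when line.isdigit() holds on the ASCII domain
    (st.1, st.2.1, st.2.2.1, st.2.2.2.1, (PySem.Int.ofStr? line).getD 0)
  else st

def read_library_log (log : List String) :
    List String × List String × List String × List String × Int :=
  log.foldl pvStepA ([], [], [], [], 0)

-- ===== PORT B =====
def read_library_log_alt (log : List String) :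
    List String × List String × List String × List String × Int :=
  let borrow_log := log.filter (fun line => pvCat line == "B")
  let return_log := log.filter (fun line => pvCat line == "R")
  let addition_log := log.filter (fun line => pvCat line == "A")
  let fine_log := log.filter (fun line => pvCat line == "P")
  let digit_lines := log.filter (fun line => PySem.Str.strIsdigit line)
  let day_available := match digit_lines.getLast? with
    | some s => (PySem.Int.ofStr? s).getD 0
    | none => 0
  (borrow_log, return_log, addition_log, fine_log, day_available)

-- ===== PRECONDITION & SPEC =====
def Spec_read_library_log (log : List String) (out : List String × List String × List String × List String × Int) : Prop := out = read_library_log_alt log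
instance (log : List String) (out : List String × List String × List String × List String × Int) : Decidable (Spec_read_library_log log out) := by unfold Spec_read_library_log; infer_instance

-- ===== CLAIM (what is proved, stated in full; the proofs are below) =====
def Claim_equal_read_library_log : Prop := ∀ (log : List String), Dom_read_library_log log → Spec_read_library_log log (read_library_log log)

-- ===== LEMMAS AND PROOFS =====

-- the day_available component of B, as a function of a default
def pvLastDay (log : List String) (d : Int) : Int :=
  match (log.filter (fun l => PySem.Str.strIsdigit l)).getLast? with
  | some s => (PySem.Int.ofStr? s).getD 0
  | none => d

lemma pvLastDay_cons_pos (x : String) (xs : List String) (d : Int)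
    (h : PySem.Str.strIsdigit x = true) :
    pvLastDay (x :: xs) d = pvLastDay xs ((PySem.Int.ofStr? x).getD 0) := by
  unfold pvLastDay
  rw [List.filter_cons, if_pos h, List.getLast?_cons]
  cases hxs : (xs.filter (fun l => PySem.Str.strIsdigit l)).getLast? with
  | none => rfl
  | some s => rfl

lemma pvLastDay_cons_neg (x : String) (xs : List String) (d : Int)
    (h : PySem.Str.strIsdigit x = false) :
    pvLastDay (x :: xs) d = pvLastDay xs d := by
  unfold pvLastDay
  rw [List.filter_cons, if_neg (by rw [h]; decide)]

-- a line whose prefix-before-'#' is "B"/"R"/"A"/"P" is not all digits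
lemma cat_letter_not_digit (line : String) (c : Char)
    (hcat : pvCat line = String.ofList [c]) (hc : PySem.Chars.isdigit c = false) :
    PySem.Str.strIsdigit line = false := by
  by_contra hne
  have hd : PySem.Str.strIsdigit line = true := by
    cases hiv : PySem.Str.strIsdigit line
    · exact absurd hiv hne
    · rfl
  have hmem : c ∈ (pvCat line).toList := by
    rw [hcat]; simp
  have hmem' : c ∈ line.toList := by
    have : (pvCat line).toList = PySem.List.slice line.toList none (some (PySem.Str.find line "#")) := by
      simp [pvCat, PySem.Str.toList_slice]
    rw [this] at hmem
    exact PySem.List.mem_of_mem_slice _ _ _ hmem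
  rw [PySem.Str.strIsdigit_eq] at hd
  simp only [PySem.Chars.strIsdigit, Bool.and_eq_true, List.all_eq_true] at hd
  have := hd.2 c hmem'
  rw [hc] at this; exact Bool.false_ne_true this

-- loop invariant: A's fold from any state appends B's filters / threads the day
lemma foldA_eq (log : List String) (b r a p : List String) (d : Int) :
    log.foldl pvStepA (b, r, a, p, d) =
      (b ++ log.filter (fun l => pvCat l == "B"),
       r ++ log.filter (fun l => pvCat l == "R"),
       a ++ log.filter (fun l => pvCat l == "A"),
       p ++ log.filter (fun l => pvCat l == "P"),
       pvLastDay log d) := by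
  induction log generalizing b r a p d with
  | nil => simp [pvLastDay]
  | cons x xs ih =>
    rw [List.foldl_cons]
    simp only [pvStepA]
    split_ifs with h1 h2 h3 h4 h5
    · rw [beq_iff_eq] at h1
      rw [ih, pvLastDay_cons_neg _ _ _ (cat_letter_not_digit x 'B' h1 (by decide))]
      simp [h1]
    · rw [beq_iff_eq] at h2
      rw [ih, pvLastDay_cons_neg _ _ _ (cat_letter_not_digit x 'R' h2 (by decide))]
      simp [h2]
    · rw [beq_iff_eq] at h3
      rw [ih, pvLastDay_cons_neg _ _ _ (cat_letter_not_digit x 'A' h3 (by decide))]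
      simp [h3]
    · rw [beq_iff_eq] at h4
      rw [ih, pvLastDay_cons_neg _ _ _ (cat_letter_not_digit x 'P' h4 (by decide))]
      simp [h4]
    · rw [ih, pvLastDay_cons_pos _ _ _ h5]
      simp [h1, h2, h3, h4]
    · rw [ih, pvLastDay_cons_neg _ _ _ (Bool.eq_false_iff.mpr h5)]
      simp [h1, h2, h3, h4]

-- ===== VERDICT (by name: the statement is the Claim_ definition above) =====
theorem read_library_log_spec : Claim_equal_read_library_log := by
  intro log _
  show read_library_log log = read_library_log_alt log
  rw [read_library_log, foldA_eq]
  simp [read_library_log_alt, pvLastDay]
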